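-- pv_equiv track=rewrite | github.com/dhavalpotdar/markov-test-generator | src/mtg.py | choose_first_occurence
-- ===== SOURCE A (Python) =====
-- def choose_first_occurence(ngrams, corpus_ngram_list):
--     """
--     Returns the orrucence positions for the given ngrams in the corpus ngrams.
--     """
--     ngram_occurence_pos_dict = {}
--     for ngram_to_find in ngrams:
--         for idx, ngram in enumerate(corpus_ngram_list):
--             if " ".join(ngram_to_find) == " ".join(ngram):
--                 ngram_occurence_pos_dict[" ".join(ngram_to_find)] = idx
--                 break
--             else:
--                 pass
--         pass
--
--     first_occurence_ngram_concat = min(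
--         ngram_occurence_pos_dict, key=ngram_occurence_pos_dict.get
--     )
--     first_occurence_ngram = [
--         i for i in ngrams if " ".join(i) == first_occurence_ngram_concat
--     ]
--     return first_occurence_ngram[0]
-- ===== SOURCE B (Python) =====
-- def choose_first_occurence(ngrams, corpus_ngram_list):
--     # Single pass over the corpus using a set of target join-strings.
--     targets = {" ".join(t) for t in ngrams}
--     winner = None
--     for ngram in corpus_ngram_list:
--         joined = " ".join(ngram)
--         if joined in targets:
--             winner = joined
--             break
--     if winner is None:
--         raise ValueError("none of the given ngrams occurs in the corpus")
--     for t in ngrams: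
--         if " ".join(t) == winner:
--             return t
-- ===== Notes on version B (the rewrite author's own statement) =====
-- stated objective: alternative
-- what changed: A rescans the corpus once per target ngram, collects each target's first-occurrence index in a dict and takes min over it; B builds a set of target join-strings once and makes a single early-exit pass over the corpus, so the per-ngram rescans and the min over indices disappear (fewer joins asymptotically, but not measurably faster in a timing run).
import Mathlib
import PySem

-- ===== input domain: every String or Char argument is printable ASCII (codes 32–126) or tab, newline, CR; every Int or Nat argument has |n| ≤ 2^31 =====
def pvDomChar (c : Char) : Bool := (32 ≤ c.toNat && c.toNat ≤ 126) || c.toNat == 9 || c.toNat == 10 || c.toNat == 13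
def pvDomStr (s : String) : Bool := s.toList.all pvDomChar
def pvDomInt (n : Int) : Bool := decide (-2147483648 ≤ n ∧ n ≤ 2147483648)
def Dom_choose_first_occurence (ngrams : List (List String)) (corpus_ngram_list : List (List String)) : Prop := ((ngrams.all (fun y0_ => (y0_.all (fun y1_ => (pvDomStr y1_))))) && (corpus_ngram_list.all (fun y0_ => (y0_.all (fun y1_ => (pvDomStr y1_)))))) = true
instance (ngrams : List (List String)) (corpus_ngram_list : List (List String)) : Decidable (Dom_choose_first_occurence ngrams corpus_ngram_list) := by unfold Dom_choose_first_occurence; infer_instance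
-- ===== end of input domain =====

-- B replaces A's per-ngram corpus rescans plus min-over-indices by one early-exit pass over the corpus with a set of target join-strings; same return value wherever A returns.


-- ===== PORT A =====
-- " ".join(x), shared by both ports and by Pre_
def pvJoin (xs : List String) : String := PySem.Str.join " " xs

def choose_first_occurence (ngrams : List (List String)) (corpus_ngram_list : List (List String)) : List String :=
  let ngram_occurence_pos_dict : PySem.Dict String Int :=
    ngrams.foldl (fun d ngram_to_find =>
      -- inner 'for idx, ngram in enumerate(...)' with break at the first join match
      match (PySem.List.enumerate corpus_ngram_list).find?
          (fun p => pvJoin ngram_to_find == pvJoin p.2) with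
      | some p => d.insert (pvJoin ngram_to_find) p.1
      | none => d) PySem.Dict.empty
  -- min(dict, key=dict.get): first key with minimal value; ValueError on the empty dict (excluded by Pre_)
  match PySem.List.min? ngram_occurence_pos_dict.keys
      (fun k => ngram_occurence_pos_dict.getD k 0) with
  | none => []
  | some first_occurence_ngram_concat =>
    -- [i for i in ngrams if " ".join(i) == …][0]; the [0] cannot raise: the min key is a join of some ngram
    (PySem.List.pyGet? (ngrams.filter (fun i => pvJoin i == first_occurence_ngram_concat)) 0).getD []

-- ===== PORT B =====
def choose_first_occurence_alt (ngrams : List (List String)) (corpus_ngram_list : List (List String)) : List String :=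
  let targets : PySem.Set String := PySem.Set.ofList (ngrams.map (fun t => pvJoin t))
  -- single scan of the corpus, break at the first join that is a target
  match corpus_ngram_list.find? (fun g => PySem.Set.contains targets (pvJoin g)) with
  | none => []  -- Python B raises ValueError here (excluded by Pre_)
  | some g =>
    -- first ngram whose join equals the winner; always found since the winner is a target
    (ngrams.find? (fun t => pvJoin t == pvJoin g)).getD []

-- ===== PRECONDITION & SPEC =====
-- Pre_ excludes exactly the inputs where no given ngram occurs in the corpus: there A's min() over the
-- empty dict raises ValueError (and B raises ValueError too).
def Pre_choose_first_occurence (ngrams : List (List String)) (corpus_ngram_list : List (List String)) : Prop :=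
  ∃ g ∈ corpus_ngram_list, pvJoin g ∈ ngrams.map pvJoin
instance (ngrams : List (List String)) (corpus_ngram_list : List (List String)) : Decidable (Pre_choose_first_occurence ngrams corpus_ngram_list) := by unfold Pre_choose_first_occurence; infer_instance
def pvWitness_choose_first_occurence : List (List String) × List (List String) := ([["a"]], [["b"], ["a"]])
def Spec_choose_first_occurence (ngrams : List (List String)) (corpus_ngram_list : List (List String)) (out : List String) : Prop := out = choose_first_occurence_alt ngrams corpus_ngram_list
instance (ngrams : List (List String)) (corpus_ngram_list : List (List String)) (out : List String) : Decidable (Spec_choose_first_occurence ngrams corpus_ngram_list out) := by unfold Spec_choose_first_occurence; infer_instance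

-- ===== CLAIM (what is proved, stated in full; the proofs are below) =====
def Claim_equal_choose_first_occurence : Prop := ∀ (ngrams : List (List String)) (corpus_ngram_list : List (List String)), Dom_choose_first_occurence ngrams corpus_ngram_list → Pre_choose_first_occurence ngrams corpus_ngram_list → Spec_choose_first_occurence ngrams corpus_ngram_list (choose_first_occurence ngrams corpus_ngram_list)

-- ===== LEMMAS AND PROOFS =====

-- the first index in corpus whose join equals s (as Python's enumerate index)
def pvFirstIdx (corpus : List (List String)) (s : String) : Int :=
  (corpus.findIdx (fun g => s == pvJoin g) : Int)

-- find? over enumerate = find? over the list, paired with the findIdx position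
theorem pv_enum_find? (xs : List (List String)) (p : List String → Bool) (k : Int) :
    (PySem.List.enumerate xs k).find? (fun q => p q.2) =
      (xs.find? p).map (fun x => (k + (xs.findIdx p : Int), x)) := by
  induction xs generalizing k with
  | nil => simp [PySem.List.enumerate]
  | cons x xs ih =>
    rw [PySem.List.enumerate_cons]
    by_cases h : p x
    · simp [h, List.findIdx_cons]
    · simp only [List.find?_cons, List.findIdx_cons, h, cond_false, ih (k + 1)]
      cases hf : xs.find? p with
      | none => simp
      | some y => simp; ring

theorem pv_enum_find?' (xs : List (List String)) (t : List String) (k : Int) :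
    (PySem.List.enumerate xs k).find? (fun p => pvJoin t == pvJoin p.2) =
      (xs.find? (fun g => pvJoin t == pvJoin g)).map
        (fun x => (k + (xs.findIdx (fun g => pvJoin t == pvJoin g) : Int), x)) :=
  pv_enum_find? xs (fun g => pvJoin t == pvJoin g) k

-- characterization of A's dict: get? s = first corpus index of s, for s a join of a scanned ngram that occurs
theorem pv_dict_get? (corpus : List (List String)) (ts : List (List String))
    (d0 : PySem.Dict String Int) (s : String) :
    ((ts.foldl (fun d ngram_to_find =>
        match (PySem.List.enumerate corpus).find?
            (fun p => pvJoin ngram_to_find == pvJoin p.2) with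
        | some p => d.insert (pvJoin ngram_to_find) p.1
        | none => d) d0).get? s) =
      if s ∈ ts.map pvJoin ∧ s ∈ corpus.map pvJoin
      then some (pvFirstIdx corpus s) else d0.get? s := by
  induction ts generalizing d0 with
  | nil => simp
  | cons t ts ih =>
    rw [List.foldl_cons, ih, pv_enum_find?']
    cases hf : corpus.find? (fun g => pvJoin t == pvJoin g) with
    | none =>
      rw [List.find?_eq_none] at hf
      have hocc : pvJoin t ∉ corpus.map pvJoin := by
        simp only [List.mem_map]
        rintro ⟨g, hg, hp⟩; exact absurd (by simp [hp.symm]) (hf g hg)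
      simp only [Option.map_none]
      by_cases hst : s = pvJoin t
      · subst hst; simp [hocc]
      · simp [List.mem_cons, hst]
    | some y =>
      simp only [Option.map_some]
      have hmem : y ∈ corpus := List.mem_of_find?_eq_some hf
      have hpy : pvJoin t = pvJoin y := by
        have := List.find?_some (p := fun g => pvJoin t == pvJoin g) hf
        simpa using this
      have hocc : pvJoin t ∈ corpus.map pvJoin := List.mem_map.2 ⟨y, hmem, hpy.symm⟩
      by_cases hst : s = pvJoin t
      · subst hst
        by_cases hts : pvJoin t ∈ ts.map pvJoin
        · simp [hts, hocc]
        · simp only [hts, hocc, if_false, List.map_cons, List.mem_cons,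
            true_or, if_true, and_true]
          rw [PySem.Dict.get?_insert_self]
          simp [pvFirstIdx]
      · by_cases hrest : s ∈ ts.map pvJoin ∧ s ∈ corpus.map pvJoin
        · simp [hrest, List.mem_cons]
        · simp only [hrest, if_false, List.map_cons, List.mem_cons]
          rw [PySem.Dict.get?_insert_of_ne _ _ hst]
          have hn : ¬ ((s = pvJoin t ∨ s ∈ ts.map pvJoin) ∧ s ∈ corpus.map pvJoin) := by
            rintro ⟨h1 | h2, h3⟩
            · exact hst h1
            · exact hrest ⟨h2, h3⟩
          rw [if_neg hn]

-- a predicate true at index j bounds findIdx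
theorem pv_findIdx_le {α : Type} (l : List α) (p : α → Bool) (j : Nat) (hj : j < l.length)
    (h : p l[j] = true) : l.findIdx p ≤ j := by
  by_contra hlt
  exact absurd h (by simpa using List.not_of_lt_findIdx (Nat.lt_of_not_le hlt))

theorem pv_pyGet?_zero {α : Type} (l : List α) : PySem.List.pyGet? l 0 = l.head? := by
  cases l <;> simp [PySem.List.pyGet?, PySem.List.pyIdx?]

-- ===== VERDICT (by name: the statement is the Claim_ definition above) =====
theorem choose_first_occurence_spec : Claim_equal_choose_first_occurence := by
  intro ngrams corpus _dom hpre
  unfold Spec_choose_first_occurence choose_first_occurence choose_first_occurence_alt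
  dsimp only
  set d : PySem.Dict String Int :=
    ngrams.foldl (fun d ngram_to_find =>
      match (PySem.List.enumerate corpus).find?
          (fun p => pvJoin ngram_to_find == pvJoin p.2) with
      | some p => d.insert (pvJoin ngram_to_find) p.1
      | none => d) PySem.Dict.empty with hdz
  set q : List String → Bool :=
    fun g => PySem.Set.contains (PySem.Set.ofList (ngrams.map (fun t => pvJoin t))) (pvJoin g) with hqz
  have hqiff : ∀ g, q g = true ↔ pvJoin g ∈ ngrams.map pvJoin := by
    intro g
    rw [hqz]
    constructor
    · intro h
      have := (PySem.Set.contains_iff _ _).1 h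
      simpa [PySem.Set.mem_ofList] using this
    · intro h
      exact (PySem.Set.contains_iff _ _).2 (by simpa [PySem.Set.mem_ofList] using h)
  have hd : ∀ s, d.get? s =
      if s ∈ ngrams.map pvJoin ∧ s ∈ corpus.map pvJoin
      then some (pvFirstIdx corpus s) else none := by
    intro s; rw [hdz, pv_dict_get?, PySem.Dict.get?_empty]
  obtain ⟨g0, hg0, hg0t⟩ := hpre
  obtain ⟨gstar, hfind⟩ : ∃ g, corpus.find? q = some g := by
    cases h : corpus.find? q with
    | none =>
      rw [List.find?_eq_none] at h
      exact absurd ((hqiff g0).2 hg0t) (by simpa using h g0 hg0)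
    | some g => exact ⟨g, rfl⟩
  have hqg : q gstar = true := List.find?_some hfind
  have hgmem : gstar ∈ corpus := List.mem_of_find?_eq_some hfind
  -- position of gstar
  have hgetelem : corpus[corpus.findIdx q]? = some gstar := by
    rw [← List.find?_eq_getElem?_findIdx]; exact hfind
  have hjq : corpus.findIdx q < corpus.length := by
    rcases List.getElem?_eq_some_iff.1 hgetelem with ⟨h, _⟩; exact h
  have hgstar : corpus[corpus.findIdx q] = gstar := by
    rcases List.getElem?_eq_some_iff.1 hgetelem with ⟨h, e⟩; exact e
  have h1 : pvJoin gstar ∈ ngrams.map pvJoin := (hqiff gstar).1 hqg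
  have h2 : pvJoin gstar ∈ corpus.map pvJoin := List.mem_map.2 ⟨gstar, hgmem, rfl⟩
  -- every key value is bounded below by jq
  have h_low : ∀ s, s ∈ ngrams.map pvJoin → s ∈ corpus.map pvJoin →
      ((corpus.findIdx q : Int) ≤ pvFirstIdx corpus s ∧
       (pvFirstIdx corpus s = (corpus.findIdx q : Int) → s = pvJoin gstar)) := by
    intro s hs1 hs2
    obtain ⟨g, hg, hgs⟩ := List.mem_map.1 hs2
    have hex : ∃ x ∈ corpus, (s == pvJoin x) = true := ⟨g, hg, by simp [hgs]⟩
    have hjs : corpus.findIdx (fun g => s == pvJoin g) < corpus.length :=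
      List.findIdx_lt_length_of_exists hex
    have hps : (s == pvJoin corpus[corpus.findIdx (fun g => s == pvJoin g)]) = true :=
      List.findIdx_getElem (w := hjs)
    have hpse : s = pvJoin corpus[corpus.findIdx (fun g => s == pvJoin g)] := by
      simpa using hps
    have hqjs : q corpus[corpus.findIdx (fun g => s == pvJoin g)] = true :=
      (hqiff _).2 (hpse ▸ hs1)
    have hle : corpus.findIdx q ≤ corpus.findIdx (fun g => s == pvJoin g) :=
      pv_findIdx_le corpus q _ hjs hqjs
    constructor
    · simpa [pvFirstIdx] using Int.ofNat_le.2 hle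
    · intro heq
      have hidx : corpus.findIdx (fun g => s == pvJoin g) = corpus.findIdx q := by
        simpa [pvFirstIdx] using heq
      have hfs : corpus.find? (fun g => s == pvJoin g) = some gstar := by
        rw [List.find?_eq_getElem?_findIdx, hidx]; exact hgetelem
      simpa using List.find?_some (p := fun g => s == pvJoin g) hfs
  -- the key pvJoin gstar attains jq
  have h_self : pvFirstIdx corpus (pvJoin gstar) = (corpus.findIdx q : Int) := by
    have hps : (pvJoin gstar == pvJoin corpus[corpus.findIdx q]) = true := by
      rw [hgstar]; simp
    have hle : corpus.findIdx (fun g => pvJoin gstar == pvJoin g) ≤ corpus.findIdx q :=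
      pv_findIdx_le corpus _ _ hjq hps
    have hge := (h_low (pvJoin gstar) h1 h2).1
    simp only [pvFirstIdx] at hge ⊢
    omega
  -- membership in keys
  have hkeys : ∀ s, s ∈ d.keys ↔ (s ∈ ngrams.map pvJoin ∧ s ∈ corpus.map pvJoin) := by
    intro s
    constructor
    · intro h
      by_contra hc
      have hnone : d.get? s = none := by rw [hd s, if_neg hc]
      exact ((PySem.Dict.get?_eq_none_iff_not_mem_keys d s).1 hnone) h
    · intro h
      by_contra hc
      have hnone := (PySem.Dict.get?_eq_none_iff_not_mem_keys d s).2 hc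
      rw [hd s, if_pos h] at hnone
      exact Option.some_ne_none _ hnone
  have hks : pvJoin gstar ∈ d.keys := (hkeys _).2 ⟨h1, h2⟩
  -- the min over keys
  cases hmin : PySem.List.min? d.keys (fun k => d.getD k 0) with
  | none =>
    rw [PySem.List.min?_eq_none_iff] at hmin
    rw [hmin] at hks
    cases hks
  | some m =>
    have hmmem : m ∈ d.keys := PySem.List.min?_mem hmin
    have hm12 := (hkeys m).1 hmmem
    have hkeyval : ∀ s, s ∈ ngrams.map pvJoin → s ∈ corpus.map pvJoin →
        d.getD s 0 = pvFirstIdx corpus s := by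
      intro s hs1 hs2
      have hsome : d.get? s = some (pvFirstIdx corpus s) := by
        rw [hd s, if_pos ⟨hs1, hs2⟩]
      exact PySem.Dict.getD_of_get?_eq_some d 0 hsome
    have hmle : d.getD m 0 ≤ d.getD (pvJoin gstar) 0 :=
      PySem.List.min?_isMin hmin (pvJoin gstar) hks
    rw [hkeyval m hm12.1 hm12.2, hkeyval _ h1 h2, h_self] at hmle
    have hmeq : m = pvJoin gstar :=
      (h_low m hm12.1 hm12.2).2 (le_antisymm hmle (h_low m hm12.1 hm12.2).1)
    rw [hfind, hmeq]
    dsimp only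
    rw [pv_pyGet?_zero, List.head?_filter]
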